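-- pv_equiv track=rewrite | github.com/sudhar-01/Maze-detection-using-Python | task1.py | findpts
-- ===== SOURCE A (Python) =====
-- import math
--
-- def findpts(cnt):
--     topLeftPt = []
--     topRightPt = []
--     bottomleft = []
--     bottomright = []
--     for i in cnt:
--         topLeftPt.append(math.sqrt((i[0][0]**2 + i[0][1]**2)))
--     for i in cnt:
--         topRightPt.append(math.sqrt(((i[0][0] - 512)**2 + i[0][1]**2)))
--     for i in cnt:
--         bottomleft.append(math.sqrt((i[0][0]**2 + (i[0][1]-512)**2)))
--     for i in cnt:
--         bottomright.append(math.sqrt(((i[0][0] - 512)**2 + (i[0][1]-512)**2)))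
--     a = cnt[topLeftPt.index(min(topLeftPt))][0]
--     b = cnt[topRightPt.index(min(topRightPt))][0]
--     c = cnt[bottomleft.index(min(bottomleft))][0]
--     d = cnt[bottomright.index(min(bottomright))][0]
--     return a,b,c,d
-- ===== SOURCE B (Python) =====
-- import math
--
-- def findpts(cnt):
--     if not cnt:
--         raise ValueError("findpts: empty contour")
--     corners = ((0, 0), (512, 0), (0, 512), (512, 512))
--     best = [None, None, None, None]  # (distance, point) per corner
--     for i in cnt:
--         p = i[0]
--         x, y = p[0], p[1]
--         for k, (cx, cy) in enumerate(corners):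
--             d = math.sqrt((x - cx) ** 2 + (y - cy) ** 2)
--             if best[k] is None or d < best[k][0]:
--                 best[k] = (d, p)
--     return best[0][1], best[1][1], best[2][1], best[3][1]
-- ===== Notes on version B (the rewrite author's own statement) =====
-- stated objective: simpler
-- what changed: One pass over cnt maintaining a (best distance, point) pair per corner, instead of building four distance lists and re-scanning each with min() and list.index(); strict '<' keeps the first minimum exactly like index(min()).
import Mathlib
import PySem

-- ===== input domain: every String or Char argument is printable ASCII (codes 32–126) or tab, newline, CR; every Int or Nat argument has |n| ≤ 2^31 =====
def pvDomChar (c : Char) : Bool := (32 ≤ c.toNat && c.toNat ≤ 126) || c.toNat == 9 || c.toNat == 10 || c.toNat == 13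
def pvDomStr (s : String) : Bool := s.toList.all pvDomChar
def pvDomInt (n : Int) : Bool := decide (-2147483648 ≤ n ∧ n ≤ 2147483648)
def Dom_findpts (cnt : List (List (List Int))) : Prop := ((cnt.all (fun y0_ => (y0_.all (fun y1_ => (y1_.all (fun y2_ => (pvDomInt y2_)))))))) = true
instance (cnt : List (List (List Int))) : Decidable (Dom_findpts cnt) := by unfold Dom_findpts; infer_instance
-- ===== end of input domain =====

-- B replaces A's four distance lists + min()/index() rescans by ONE pass over cnt keeping a
-- (best distance, point) pair per corner (strict '<' keeps the first minimum, like index(min())).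


-- ===== PORT A =====
-- shared model of CPython's math.sqrt on an int argument, as the exact rational value of the
-- IEEE-754 double it produces: first the int is rounded to the nearest double (ties to even),
-- then the correctly rounded square root is taken; exact for 0 ≤ s < 2^64 (Dom keeps s there).
def pvRoundEven (num den : Nat) : Nat :=
  let q := num / den
  let rem := num % den
  if den < 2 * rem then q + 1
  else if 2 * rem < den then q
  else if q % 2 = 0 then q else q + 1

def pvSqrt (s : Int) : ℚ :=
  if s ≤ 0 then 0
  else
    let n := s.toNat
    let L := Nat.log2 n
    let n' := if L ≤ 52 then n else pvRoundEven n (2 ^ (L - 52)) * 2 ^ (L - 52)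
    let e := Nat.log2 n' / 2
    let N := n' * 4 ^ (52 - e)
    let r := Nat.sqrt N
    let m := if r < N - r * r then r + 1 else r
    ((m : ℚ) * 2 ^ e) / 2 ^ 52

-- i[0]  (under Pre_ the inner list is nonempty; the .getD [] default is never reached inside Pre_)
def pvPt (i : List (List Int)) : List Int := (PySem.List.pyGet? i 0).getD []

-- math.sqrt((i[0][0] - cx)**2 + (i[0][1] - cy)**2)
def pvDist (cx cy : Int) (i : List (List Int)) : ℚ :=
  pvSqrt (((PySem.List.pyGet? (pvPt i) 0).getD 0 - cx) ^ 2 + ((PySem.List.pyGet? (pvPt i) 1).getD 0 - cy) ^ 2)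

-- cnt[ds.index(min(ds))][0]
def pvPick (cnt : List (List (List Int))) (ds : List ℚ) : List Int :=
  match PySem.List.min? ds (fun x => x) with
  | none => []
  | some m =>
    match PySem.List.index? ds m with
    | none => []
    | some j => pvPt ((PySem.List.pyGet? cnt (j : Int)).getD [])

def findpts (cnt : List (List (List Int))) : List Int × List Int × List Int × List Int :=
  let topLeftPt := cnt.map (pvDist 0 0)
  let topRightPt := cnt.map (pvDist 512 0)
  let bottomleft := cnt.map (pvDist 0 512)
  let bottomright := cnt.map (pvDist 512 512)
  (pvPick cnt topLeftPt, pvPick cnt topRightPt, pvPick cnt bottomleft, pvPick cnt bottomright)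

-- ===== PORT B =====
-- update one corner's best (None ↦ take, strictly smaller ↦ take, else keep: first minimum wins)
def pvUpd (f : List (List Int) → ℚ) (b : Option (ℚ × List Int)) (i : List (List Int)) :
    Option (ℚ × List Int) :=
  match b with
  | none => some (f i, pvPt i)
  | some (m, p) => if f i < m then some (f i, pvPt i) else some (m, p)

-- one loop iteration updates all four corners
def pvStep
    (st : Option (ℚ × List Int) × Option (ℚ × List Int) × Option (ℚ × List Int) × Option (ℚ × List Int))
    (i : List (List Int)) :
    Option (ℚ × List Int) × Option (ℚ × List Int) × Option (ℚ × List Int) × Option (ℚ × List Int) :=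
  (pvUpd (pvDist 0 0) st.1 i, pvUpd (pvDist 512 0) st.2.1 i,
   pvUpd (pvDist 0 512) st.2.2.1 i, pvUpd (pvDist 512 512) st.2.2.2 i)

def pvFin (b : Option (ℚ × List Int)) : List Int :=
  match b with | none => [] | some (_, p) => p

def findpts_alt (cnt : List (List (List Int))) : List Int × List Int × List Int × List Int :=
  if cnt.isEmpty then ([], [], [], [])  -- Python B raises ValueError here; outside Pre_
  else
    let st := cnt.foldl pvStep (none, none, none, none)
    (pvFin st.1, pvFin st.2.1, pvFin st.2.2.1, pvFin st.2.2.2)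

-- ===== PRECONDITION & SPEC =====
-- Pre_ excludes exactly the inputs on which Python A raises: empty cnt (ValueError from min([]))
-- and points i with i == [] or len(i[0]) < 2 (IndexError on i[0][0] / i[0][1]).
def Pre_findpts (cnt : List (List (List Int))) : Prop :=
  cnt ≠ [] ∧ ∀ i ∈ cnt, i ≠ [] ∧ 2 ≤ i.headI.length
instance (cnt : List (List (List Int))) : Decidable (Pre_findpts cnt) := by
  unfold Pre_findpts; infer_instance

def pvWitness_findpts : List (List (List Int)) := [[[1, 2]], [[500, 500]]]

def Spec_findpts (cnt : List (List (List Int))) (out : List Int × List Int × List Int × List Int) : Prop := out = findpts_alt cnt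
instance (cnt : List (List (List Int))) (out : List Int × List Int × List Int × List Int) : Decidable (Spec_findpts cnt out) := by unfold Spec_findpts; infer_instance

-- ===== CLAIM (what is proved, stated in full; the proofs are below) =====
def Claim_equal_findpts : Prop := ∀ (cnt : List (List (List Int))), Dom_findpts cnt → Pre_findpts cnt → Spec_findpts cnt (findpts cnt)

-- ===== LEMMAS AND PROOFS =====

-- the first-minimum pair, computed structurally (proof-side reference object)
def pvBest (f : List (List Int) → ℚ) : List (List (List Int)) → Option (ℚ × List Int)
  | [] => none
  | i :: rest =>
    match pvBest f rest with
    | none => some (f i, pvPt i)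
    | some (m, p) => if f i ≤ m then some (f i, pvPt i) else some (m, p)

lemma pvBest_cons (f : List (List Int) → ℚ) (i : List (List Int)) (l : List (List (List Int))) :
    pvBest f (i :: l) =
      match pvBest f l with
      | none => some (f i, pvPt i)
      | some (m, p) => if f i ≤ m then some (f i, pvPt i) else some (m, p) := rfl

lemma foldl_min_min (a b : ℚ) (l : List ℚ) :
    l.foldl min (min a b) = min a (l.foldl min b) := by
  induction l generalizing a b with
  | nil => simp
  | cons c t ih =>
    simp only [List.foldl_cons]
    rw [min_assoc, ih]

-- B's running fold from a `some` state, characterised by pvBest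
lemma foldl_upd_some (f : List (List Int) → ℚ) (l : List (List (List Int))) :
    ∀ (m : ℚ) (p : List Int),
      l.foldl (pvUpd f) (some (m, p)) =
        match pvBest f l with
        | none => some (m, p)
        | some (m', p') => if m' < m then some (m', p') else some (m, p) := by
  induction l with
  | nil => intro m p; simp [pvBest]
  | cons i rest ih =>
    intro m p
    rw [List.foldl_cons, pvBest_cons]
    cases hb : pvBest f rest with
    | none =>
      simp only [pvUpd]
      split_ifs with h1
      · rw [ih]; simp [hb]
      · rw [ih]; simp [hb]
    | some v =>
      obtain ⟨m', p'⟩ := v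
      simp only [pvUpd]
      split_ifs with h1 h2 h2 <;> rw [ih] <;> simp only [hb] <;>
        split_ifs <;> first | rfl | (exfalso; linarith)

lemma foldl_upd_none (f : List (List Int) → ℚ) (l : List (List (List Int))) :
    l.foldl (pvUpd f) none = pvBest f l := by
  cases l with
  | nil => rfl
  | cons i rest =>
    rw [List.foldl_cons, pvBest_cons]
    show List.foldl (pvUpd f) (some (f i, pvPt i)) rest = _
    rw [foldl_upd_some]
    cases hb : pvBest f rest with
    | none => rfl
    | some v =>
      obtain ⟨m', p'⟩ := v
      simp only
      split_ifs <;> first | rfl | (exfalso; linarith)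

-- A's min()/index()/subscript pipeline lands on exactly the pvBest pair
lemma bestA (f : List (List Int) → ℚ) (l : List (List (List Int))) (hl : l ≠ []) :
    ∃ (m : ℚ) (j : Nat), pvBest f l = some (m, pvPt ((PySem.List.pyGet? l (j : Int)).getD [])) ∧
      PySem.List.min? (l.map f) (fun x => x) = some m ∧
      PySem.List.index? (l.map f) m = some j := by
  induction l with
  | nil => exact absurd rfl hl
  | cons i rest ih =>
    cases rest with
    | nil =>
      refine ⟨f i, 0, ?_, ?_, ?_⟩
      · simp [pvBest]
      · simp [PySem.List.min?_id_cons]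
      · simp
    | cons i2 t =>
      obtain ⟨m', j', hbest, hmin, hidx⟩ := ih (by simp)
      have hminval : PySem.List.min? ((i :: i2 :: t).map f) (fun x => x) = some (min (f i) m') := by
        simp only [List.map_cons] at hmin ⊢
        rw [PySem.List.min?_id_cons] at hmin ⊢
        have hv : (List.map f t).foldl min (f i2) = m' := by
          simpa using hmin
        simp only [List.foldl_cons]
        rw [foldl_min_min, hv]
      by_cases h : f i ≤ m'
      · refine ⟨f i, 0, ?_, ?_, ?_⟩
        · rw [pvBest_cons, hbest]; simp [h]
        · rw [hminval]; congr 1; exact min_eq_left h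
        · rw [List.map_cons]
          exact PySem.List.index?_cons_self (f i) _
      · refine ⟨m', j' + 1, ?_, ?_, ?_⟩
        · rw [pvBest_cons, hbest]
          dsimp only
          rw [if_neg h, show ((j' + 1 : Nat) : Int) = ((j' : Int) + 1) by push_cast; ring,
            PySem.List.pyGet?_cons_succ i (i2 :: t) j']
        · rw [hminval]; congr 1; exact min_eq_right (by linarith)
        · have hne2 : f i ≠ m' := fun hx => h hx.le
          rw [List.map_cons, PySem.List.index?_cons_of_ne _ hne2, hidx]
          rfl

-- per-corner equality of the two pipelines
lemma pick_eq_fold (f : List (List Int) → ℚ) (l : List (List (List Int))) (hl : l ≠ []) :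
    pvPick l (l.map f) = pvFin (l.foldl (pvUpd f) none) := by
  obtain ⟨m, j, hbest, hmin, hidx⟩ := bestA f l hl
  rw [foldl_upd_none, hbest]
  rw [PySem.List.index?_eq_idxOf?] at hidx
  simp [pvPick, hmin, hidx, pvFin]

-- the quadruple fold is the quadruple of the four independent folds
lemma foldl_step_split (l : List (List (List Int)))
    (st : Option (ℚ × List Int) × Option (ℚ × List Int) × Option (ℚ × List Int) × Option (ℚ × List Int)) :
    l.foldl pvStep st =
      (l.foldl (pvUpd (pvDist 0 0)) st.1, l.foldl (pvUpd (pvDist 512 0)) st.2.1,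
       l.foldl (pvUpd (pvDist 0 512)) st.2.2.1, l.foldl (pvUpd (pvDist 512 512)) st.2.2.2) := by
  induction l generalizing st with
  | nil => rfl
  | cons i rest ih => simp only [List.foldl_cons, ih, pvStep]

-- ===== VERDICT (by name: the statement is the Claim_ definition above) =====
theorem findpts_spec : Claim_equal_findpts := by
  intro cnt _hdom hpre
  obtain ⟨hne, _⟩ := hpre
  unfold Spec_findpts findpts findpts_alt
  have hemp : cnt.isEmpty = false := by simpa [List.isEmpty_iff] using hne
  rw [hemp]
  simp only [if_false, Bool.false_eq_true, foldl_step_split]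
  exact congrArg₂ Prod.mk (pick_eq_fold _ _ hne)
    (congrArg₂ Prod.mk (pick_eq_fold _ _ hne)
      (congrArg₂ Prod.mk (pick_eq_fold _ _ hne) (pick_eq_fold _ _ hne)))
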